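-- pv_equiv track=rewrite | github.com/sh1doy/AntBook | sec2_7/Bribe_the_Prisoners.py | solve
-- ===== SOURCE A (Python) =====
-- def solve(P,Q,A):
-- 	dp=[[0 for i in range(Q+2)]	for i in range(Q+2)] #dp[i][j]i~j人目までを開放するコスト
-- 	A.insert(0,0)
-- 	A.append(P+1)
-- 	for j in range(1,Q+2):
-- 		for i in range(j-1)[::-1]:
-- 			dp[i][j]=min([dp[i][k]+dp[k][j] for k in range(i+1,j)])+A[j]-A[i]-2
-- 	return(dp[0][Q+1])
-- ===== SOURCE B (Python) =====
-- def solve(P, Q, A):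
--     pts = [0] + A + [P + 1]
--     memo = [[None] * (Q + 2) for _ in range(Q + 2)]
--
--     def cost(i, j):
--         if j - i <= 1:
--             return 0
--         r = memo[i][j]
--         if r is None:
--             best = None
--             for k in range(i + 1, j):
--                 left = memo[i][k]
--                 if left is None:
--                     left = cost(i, k)
--                 right = memo[k][j]
--                 if right is None:
--                     right = cost(k, j)
--                 v = left + right
--                 if best is None or v < best:
--                     best = v
--             r = best + pts[j] - pts[i] - 2
--             memo[i][j] = r
--         return r
--
--     return cost(0, Q + 1)
-- ===== Notes on version B (the rewrite author's own statement) =====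
-- stated objective: alternative
-- what changed: Replaces A's bottom-up DP that pre-allocates a (Q+2)x(Q+2) nested-list table and fills it column by column with a descending inner loop by top-down memoized recursion on intervals: a recursive cost(i,j) that computes intervals on demand and memoizes them, with a running min and read-or-recurse lookups instead of A's staged filling loops; Knuth's O(Q^2) optimization was considered but is only valid for sorted positions, which A never assumes, so it would not be exactly equivalent.
import Mathlib
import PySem

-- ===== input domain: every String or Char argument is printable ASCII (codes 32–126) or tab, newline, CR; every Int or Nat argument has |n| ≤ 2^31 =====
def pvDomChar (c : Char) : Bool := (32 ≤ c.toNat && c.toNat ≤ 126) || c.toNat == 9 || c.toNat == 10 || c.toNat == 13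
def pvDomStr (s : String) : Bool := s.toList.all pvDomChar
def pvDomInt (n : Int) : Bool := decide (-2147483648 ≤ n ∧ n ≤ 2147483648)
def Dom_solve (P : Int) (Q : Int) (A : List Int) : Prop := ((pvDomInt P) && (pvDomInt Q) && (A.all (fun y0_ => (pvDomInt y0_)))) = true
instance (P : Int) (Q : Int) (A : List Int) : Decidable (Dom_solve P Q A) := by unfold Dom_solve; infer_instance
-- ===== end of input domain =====

-- B replaces A's bottom-up (Q+2)×(Q+2) table, filled column by column with a descending inner
-- loop, by top-down memoized recursion on intervals (a different decomposition: recursion on the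
-- interval structure with an on-demand memo of computed intervals instead of staged
-- table-filling loops).
-- Python A mutates its argument A in place (insert/append); B does not; the equivalence proved
-- here is about the RETURN value only.

-- ===== PORT A =====
-- dp[i][j] read / write (python list-of-lists indexing)
def pvG (dp : List (List Int)) (i j : Int) : Int :=
  PySem.List.pyGetD (PySem.List.pyGetD dp i []) j 0

def pvWrite (dp : List (List Int)) (i j : Int) (v : Int) : List (List Int) :=
  PySem.List.pySetD dp i (PySem.List.pySetD (PySem.List.pyGetD dp i []) j v)

-- body of the inner 'for i in range(j-1)[::-1]' loop
def pvInner (A1 : List Int) (j : Int) (dp : List (List Int)) (i : Int) : List (List Int) :=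
  pvWrite dp i j
    ((PySem.List.min? ((PySem.List.pyRange (i+1) j 1).map
        (fun k => pvG dp i k + pvG dp k j)) (fun x => x)).getD 0
      + PySem.List.pyGetD A1 j 0 - PySem.List.pyGetD A1 i 0 - 2)

-- body of the outer 'for j in range(1,Q+2)' loop; range(j-1)[::-1] is the reversed range
def pvOuter (A1 : List Int) (dp : List (List Int)) (j : Int) : List (List Int) :=
  ((PySem.List.pyRange 0 (j-1) 1).reverse).foldl (pvInner A1 j) dp

def solve (P : Int) (Q : Int) (A : List Int) : Int :=
  let dp0 : List (List Int) :=
    (PySem.List.pyRange 0 (Q+2) 1).map (fun _ =>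
      (PySem.List.pyRange 0 (Q+2) 1).map (fun _ => (0:Int)))
  let A1 : List Int := PySem.List.insert A 0 0 ++ [P+1]   -- A.insert(0,0); A.append(P+1)
  pvG ((PySem.List.pyRange 1 (Q+2) 1).foldl (pvOuter A1) dp0) 0 (Q+1)

-- ===== PORT B =====
-- Source B's inner function 'cost(i, j)', with the mutable memo table (a (Q+2)x(Q+2) list of
-- lists of None-or-int) threaded through as state, so cost returns (value, updated memo).
-- memo[a][b] read / write (python list-of-lists indexing; indices are nonnegative here)
def pvR (memo : List (List (Option Int))) (a b : Int) : Option Int :=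
  PySem.List.pyGetD (PySem.List.pyGetD memo a []) b none

def pvWriteO (memo : List (List (Option Int))) (i j : Int) (v : Option Int) :
    List (List (Option Int)) :=
  PySem.List.pySetD memo i (PySem.List.pySetD (PySem.List.pyGetD memo i []) j v)

-- 'if best is None or v < best: best = v'
def pvStep (best : Option Int) (v : Int) : Option Int :=
  match best with
  | none => some v
  | some b => if v < b then some v else some b

-- one iteration of 'for k in range(i + 1, j)': read-or-recurse left and right, update best
def pvBody (rec : Int → Int → List (List (Option Int)) → Int × List (List (Option Int)))
    (i j : Int) (s : Option Int × List (List (Option Int))) (k : Int) :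
    Option Int × List (List (Option Int)) :=
  let l := match pvR s.2 i k with
    | some v => (v, s.2)
    | none => rec i k s.2
  let rr := match pvR l.2 k j with
    | some v => (v, l.2)
    | none => rec k j l.2
  (pvStep s.1 (l.1 + rr.1), rr.2)

-- cost(i, j); the fuel argument only makes the recursion structural: it bounds the interval
-- length j - i, which strictly decreases at every recursive call, so with fuel ≥ j - i the
-- fuel-exhausted branch is never reached
def pvCostRec (pts : List Int) :
    Nat → Int → Int → List (List (Option Int)) → Int × List (List (Option Int))
  | 0, _, _, memo => (0, memo)
  | fuel+1, i, j, memo =>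
    if j - i ≤ 1 then (0, memo)
    else
      match pvR memo i j with
      | some r => (r, memo)
      | none =>
        let s := (PySem.List.pyRange (i+1) j 1).foldl (pvBody (pvCostRec pts fuel) i j)
          (none, memo)
        -- the k-loop is nonempty here (j - i ≥ 2), so best is some; '.getD 0' is inert
        let r := s.1.getD 0 + PySem.List.pyGetD pts j 0 - PySem.List.pyGetD pts i 0 - 2
        (r, pvWriteO s.2 i j (some r))

def solve_alt (P : Int) (Q : Int) (A : List Int) : Int :=
  let pts : List Int := [0] ++ A ++ [P+1]
  let memo : List (List (Option Int)) :=
    (PySem.List.pyRange 0 (Q+2) 1).map (fun _ => List.replicate (Q+2).toNat (none : Option Int))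
  (pvCostRec pts (Q+2).toNat 0 (Q+1) memo).1

-- ===== PRECONDITION & SPEC =====
-- Pre_ excludes exactly the inputs where Python A raises IndexError: Q ≤ -2 (the dp table is empty)
-- or 1 ≤ Q with fewer than Q prisoner positions (A[j] out of range).
def Pre_solve (P : Int) (Q : Int) (A : List Int) : Prop :=
  -1 ≤ Q ∧ (1 ≤ Q → Q ≤ (A.length : Int))
instance (P : Int) (Q : Int) (A : List Int) : Decidable (Pre_solve P Q A) := by
  unfold Pre_solve; infer_instance

def pvWitness_solve : Int × Int × List Int := (8, 1, [3])

def Spec_solve (P : Int) (Q : Int) (A : List Int) (out : Int) : Prop := out = solve_alt P Q A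
instance (P : Int) (Q : Int) (A : List Int) (out : Int) : Decidable (Spec_solve P Q A out) := by
  unfold Spec_solve; infer_instance

-- ===== CLAIM (what is proved, stated in full; the proofs are below) =====
def Claim_equal_solve : Prop := ∀ (P : Int) (Q : Int) (A : List Int),
  Dom_solve P Q A → Pre_solve P Q A → Spec_solve P Q A (solve P Q A)

-- ===== LEMMAS AND PROOFS =====

-- proof-side specification: the interval cost both programs compute
def pvCost (pts : List Int) (i j : Int) : Int :=
  if j - i ≤ 1 then 0
  else
    (PySem.List.min? ((PySem.List.pyRange (i+1) j 1).attach.map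
        (fun k => pvCost pts i k.1 + pvCost pts k.1 j)) (fun x => x)).getD 0
      + PySem.List.pyGetD pts j 0 - PySem.List.pyGetD pts i 0 - 2
termination_by (j - i).toNat
decreasing_by
  · have hk := k.2; rw [PySem.List.mem_pyRange_one] at hk; omega
  · have hk := k.2; rw [PySem.List.mem_pyRange_one] at hk; omega

theorem pvCost_deg (pts : List Int) (i j : Int) (h : j - i ≤ 1) : pvCost pts i j = 0 := by
  rw [pvCost]; simp [h]

theorem pvCost_unfold (pts : List Int) (i j : Int) (h : 2 ≤ j - i) :
    pvCost pts i j = (PySem.List.min? ((PySem.List.pyRange (i+1) j 1).map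
        (fun k => pvCost pts i k + pvCost pts k j)) (fun x => x)).getD 0
      + PySem.List.pyGetD pts j 0 - PySem.List.pyGetD pts i 0 - 2 := by
  rw [pvCost, if_neg (by omega)]
  rw [List.attach_map_val (f := fun k => pvCost pts i k + pvCost pts k j)]

-- ---- A side: the bottom-up table loop computes pvCost ----

-- shape of the dp table: a (Q+2)×(Q+2) rectangle
def pvShape (Q : Int) (dp : List (List Int)) : Prop :=
  dp.length = (Q+2).toNat ∧ ∀ r ∈ dp, r.length = (Q+2).toNat

-- the loop invariant: columns before jd are fully computed, column jd is computed from row idn up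
def pvInv (pts : List Int) (Q : Int) (dp : List (List Int)) (jd idn : Int) : Prop :=
  pvShape Q dp ∧
  ∀ i' j' : Int, 0 ≤ i' → i' ≤ Q+1 → 0 ≤ j' → j' ≤ Q+1 →
    pvG dp i' j' = if j' < jd ∨ (j' = jd ∧ idn ≤ i') then pvCost pts i' j' else 0

theorem pvGetD_nn {α : Type} (xs : List α) (i : Int) (d : α) (h : 0 ≤ i) :
    PySem.List.pyGetD xs i d = (xs[i.toNat]?).getD d := by
  simp [PySem.List.pyGetD, PySem.List.pyGet?_of_nonneg xs h]

theorem pvShape_write (Q : Int) (dp : List (List Int)) (i j v : Int)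
    (hs : pvShape Q dp) (hi : 0 ≤ i) (hiQ : i ≤ Q + 1) : pvShape Q (pvWrite dp i j v) := by
  obtain ⟨hlen, hrow⟩ := hs
  have hin : i.toNat < dp.length := by omega
  have hrowmem : (PySem.List.pyGetD dp i []) ∈ dp := by
    rw [pvGetD_nn dp i [] hi, List.getElem?_eq_getElem hin]
    exact List.getElem_mem hin
  constructor
  · rw [pvWrite, PySem.List.length_pySetD]; exact hlen
  · intro r hr
    rw [pvWrite, PySem.List.pySetD_of_nonneg dp _ hi] at hr
    rcases List.mem_or_eq_of_mem_set hr with h1 | h1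
    · exact hrow r h1
    · subst h1; rw [PySem.List.length_pySetD]; exact hrow _ hrowmem

theorem pvG_write (Q : Int) (dp : List (List Int)) (i j v i' j' : Int)
    (hs : pvShape Q dp) (hi : 0 ≤ i) (hiQ : i ≤ Q + 1) (hj : 0 ≤ j) (hjQ : j ≤ Q + 1)
    (hi' : 0 ≤ i') (hj' : 0 ≤ j') :
    pvG (pvWrite dp i j v) i' j' = if i' = i ∧ j' = j then v else pvG dp i' j' := by
  obtain ⟨hlen, hrow⟩ := hs
  have hin : i.toNat < dp.length := by omega
  have hrowmem : (PySem.List.pyGetD dp i []) ∈ dp := by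
    rw [pvGetD_nn dp i [] hi, List.getElem?_eq_getElem hin]
    exact List.getElem_mem hin
  have hrlen : (PySem.List.pyGetD dp i []).length = (Q+2).toNat := hrow _ hrowmem
  have hjin : j.toNat < (PySem.List.pyGetD dp i []).length := by omega
  rw [pvG, pvWrite, PySem.List.pySetD_of_nonneg dp _ hi,
      PySem.List.pySetD_of_nonneg _ _ hj,
      pvGetD_nn _ i' _ hi', pvGetD_nn _ j' _ hj', List.getElem?_set]
  by_cases hii : i' = i
  · subst hii
    rw [if_pos (by omega), if_pos hin]
    simp only [Option.getD_some, List.getElem?_set]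
    by_cases hjj : j' = j
    · subst hjj
      rw [if_pos (by omega), if_pos hjin, if_pos (by tauto)]
      rfl
    · rw [if_neg (by omega), if_neg (by tauto), pvG, pvGetD_nn _ i' _ hi',
          pvGetD_nn _ j' _ hj']
  · rw [if_neg (by omega), if_neg (by tauto), pvG, pvGetD_nn _ i' _ hi',
        pvGetD_nn _ j' _ hj']

-- one write of the inner loop preserves the invariant
theorem pvInner_step (pts : List Int) (Q j i : Int) (dp : List (List Int))
    (h1 : 1 ≤ j) (hjQ : j ≤ Q + 1) (hi : 0 ≤ i) (hij : i ≤ j - 2)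
    (hInv : pvInv pts Q dp j (i+1)) :
    pvInv pts Q (pvInner pts j dp i) j i := by
  obtain ⟨hs, hg⟩ := hInv
  have hv : ((PySem.List.min? ((PySem.List.pyRange (i+1) j 1).map
        (fun k => pvG dp i k + pvG dp k j)) (fun x => x)).getD 0
      + PySem.List.pyGetD pts j 0 - PySem.List.pyGetD pts i 0 - 2) = pvCost pts i j := by
    rw [pvCost_unfold pts i j (by omega)]
    have hmap : (PySem.List.pyRange (i+1) j 1).map (fun k => pvG dp i k + pvG dp k j)
        = (PySem.List.pyRange (i+1) j 1).map (fun k => pvCost pts i k + pvCost pts k j) := by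
      apply List.map_congr_left
      intro k hk
      rw [PySem.List.mem_pyRange_one] at hk
      rw [hg i k (by omega) (by omega) (by omega) (by omega), if_pos (by omega),
          hg k j (by omega) (by omega) (by omega) (by omega), if_pos (by omega)]
    rw [hmap]
  rw [pvInner, hv]
  refine ⟨pvShape_write Q dp i j _ hs hi (by omega), fun i' j' h1' h2' h3' h4' => ?_⟩
  rw [pvG_write Q dp i j _ i' j' hs hi (by omega) (by omega) hjQ h1' h3']
  by_cases hc : i' = i ∧ j' = j
  · rw [if_pos hc, if_pos (by omega)]
    rw [hc.1, hc.2]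
  · rw [if_neg hc, hg i' j' h1' h2' h3' h4']
    by_cases hold : j' < j ∨ (j' = j ∧ i + 1 ≤ i')
    · rw [if_pos hold, if_pos (by omega)]
    · rw [if_neg hold, if_neg (by omega)]

-- the whole inner loop (over range(0,m)[::-1]) finishes column j
theorem pvInner_loop (pts : List Int) (Q j : Int) (m : Nat) (dp : List (List Int))
    (h1 : 1 ≤ j) (hjQ : j ≤ Q + 1) (hm : (m : Int) ≤ j - 1)
    (hInv : pvInv pts Q dp j m) :
    pvInv pts Q (((PySem.List.pyRange 0 m 1).reverse).foldl (pvInner pts j) dp) j 0 := by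
  induction m generalizing dp with
  | zero =>
    rw [PySem.List.pyRange_one_eq_nil (by omega)]
    simpa using hInv
  | succ m ih =>
    have hcast : ((m+1 : Nat) : Int) = (m : Int) + 1 := by push_cast; ring
    rw [hcast, PySem.List.pyRange_one_succ_right (by omega), List.reverse_append,
        List.reverse_singleton, List.singleton_append, List.foldl_cons]
    exact ih (pvInner pts j dp m) (by omega)
      (pvInner_step pts Q j m dp h1 hjQ (by omega) (by omega) (by rw [← hcast]; exact hInv))

-- moving to the next column: a fully computed column j re-reads as column j+1 with nothing done
theorem pvShift (pts : List Int) (Q j : Int) (dp : List (List Int))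
    (hInv : pvInv pts Q dp j 0) : pvInv pts Q dp (j+1) j := by
  obtain ⟨hs, hg⟩ := hInv
  refine ⟨hs, fun i' j' h1 h2 h3 h4 => ?_⟩
  rw [hg i' j' h1 h2 h3 h4]
  by_cases hdeg : j' - i' ≤ 1
  · rw [pvCost_deg pts i' j' hdeg]; split_ifs <;> rfl
  · split_ifs <;> first | rfl | omega

theorem pvInit (pts : List Int) (Q : Int) :
    pvInv pts Q ((PySem.List.pyRange 0 (Q+2) 1).map (fun _ =>
      (PySem.List.pyRange 0 (Q+2) 1).map (fun _ => (0:Int)))) 1 0 := by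
  constructor
  · constructor
    · rw [List.length_map, PySem.List.length_pyRange_one]; omega
    · intro r hr
      obtain ⟨x, _, hx⟩ := List.mem_map.mp hr
      rw [← hx, List.length_map, PySem.List.length_pyRange_one]; omega
  · intro i' j' h1 h2 h3 h4
    have hz : pvG ((PySem.List.pyRange 0 (Q+2) 1).map (fun _ =>
        (PySem.List.pyRange 0 (Q+2) 1).map (fun _ => (0:Int)))) i' j' = 0 := by
      rw [pvG, pvGetD_nn _ i' _ h1, pvGetD_nn _ j' _ h3]
      cases hrow : ((PySem.List.pyRange 0 (Q+2) 1).map (fun _ =>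
          (PySem.List.pyRange 0 (Q+2) 1).map (fun _ => (0:Int))))[i'.toNat]? with
      | none => simp
      | some r =>
        obtain ⟨x, _, hx⟩ := List.mem_map.mp (List.mem_of_getElem? hrow)
        simp only [Option.getD_some]
        cases hcell : r[j'.toNat]? with
        | none => simp
        | some c =>
          have := List.mem_of_getElem? hcell
          rw [← hx] at this
          obtain ⟨y, _, hy⟩ := List.mem_map.mp this
          simp [← hy]
    rw [hz]
    split_ifs with hc
    · rw [pvCost_deg pts i' j' (by omega)]
    · rfl

-- the outer loop over columns 1 .. 1+t
theorem pvOuter_loop (pts : List Int) (Q : Int) (t : Nat) (dp : List (List Int))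
    (ht : 1 + (t : Int) ≤ Q + 2) (hInv : pvInv pts Q dp 1 0) :
    pvInv pts Q ((PySem.List.pyRange 1 (1 + (t : Int)) 1).foldl (pvOuter pts) dp) (1 + (t : Int)) t := by
  induction t with
  | zero =>
    rw [Nat.cast_zero, PySem.List.pyRange_one_eq_nil (by omega)]
    simpa using hInv
  | succ t ih =>
    have hcast : ((t+1 : Nat) : Int) = (t : Int) + 1 := by push_cast; ring
    rw [hcast]
    have hsplit : (1 : Int) + ((t : Int) + 1) = (1 + (t : Int)) + 1 := by ring
    rw [hsplit, PySem.List.pyRange_one_succ_right (by omega), List.foldl_append,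
        List.foldl_cons, List.foldl_nil]
    have hprev := ih (by omega)
    have hafter : pvInv pts Q (pvOuter pts
        ((PySem.List.pyRange 1 (1 + (t : Int)) 1).foldl (pvOuter pts) dp) (1 + (t : Int)))
        (1 + (t : Int)) 0 := by
      rw [pvOuter]
      have harg : (1 + (t : Int)) - 1 = (t : Int) := by ring
      rw [harg]
      exact pvInner_loop pts Q (1 + (t : Int)) t _ (by omega) (by omega) (by omega) hprev
    have := pvShift pts Q (1 + (t : Int)) _ hafter
    rw [show ((t : Int) + 1) = 1 + (t : Int) from by ring]
    exact this

theorem pvSolveA_eq (P Q : Int) (A : List Int) (hQ : -1 ≤ Q) :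
    solve P Q A = pvCost (0 :: (A ++ [P+1])) 0 (Q+1) := by
  unfold solve
  simp only [PySem.List.insert_zero, List.cons_append]
  set pts : List Int := 0 :: (A ++ [P+1]) with hpts
  have ht : (((Q+1).toNat : Int)) = Q + 1 := by omega
  have hfin := pvOuter_loop pts Q (Q+1).toNat _ (by omega) (pvInit pts Q)
  rw [ht] at hfin
  obtain ⟨_, hg⟩ := hfin
  have := hg 0 (Q+1) (by omega) (by omega) (by omega) (by omega)
  rw [if_pos (by omega)] at this
  have harg : (1 : Int) + (Q + 1) = Q + 2 := by ring
  rw [harg] at this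
  exact this

-- ---- B side: the memoized recursion computes pvCost ----

-- a memo is good when every stored entry (at nonnegative indices, the only ones cost uses)
-- is the true interval cost
def pvGoodM (pts : List Int) (memo : List (List (Option Int))) : Prop :=
  ∀ a b v : Int, 0 ≤ a → 0 ≤ b → pvR memo a b = some v → v = pvCost pts a b

-- a write at (i, j) leaves every (nonneg-indexed) cell either unchanged or equal to the
-- written value at (i, j)
theorem pvR_writeO (memo : List (List (Option Int))) (i j a b : Int) (v : Option Int)
    (hi : 0 ≤ i) (hj : 0 ≤ j) (ha : 0 ≤ a) (hb : 0 ≤ b) :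
    pvR (pvWriteO memo i j v) a b = pvR memo a b ∨
      (a = i ∧ b = j ∧ pvR (pvWriteO memo i j v) a b = v) := by
  by_cases hai : a = i
  · subst hai
    have hrw : pvWriteO memo a j v
        = memo.set a.toNat (PySem.List.pySetD (PySem.List.pyGetD memo a []) j v) := by
      rw [pvWriteO, PySem.List.pySetD_of_nonneg memo _ ha]
    by_cases hlen : a.toNat < memo.length
    · have hrow : PySem.List.pyGetD (pvWriteO memo a j v) a []
          = PySem.List.pySetD (PySem.List.pyGetD memo a []) j v := by
        rw [hrw, pvGetD_nn _ a _ ha, List.getElem?_set, if_pos rfl, if_pos hlen,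
            Option.getD_some]
      by_cases hbj : b = j
      · subst hbj
        by_cases hrlen : b.toNat < (PySem.List.pyGetD memo a []).length
        · right
          refine ⟨rfl, rfl, ?_⟩
          rw [pvR, hrow, PySem.List.pySetD_of_nonneg _ _ hj, pvGetD_nn _ b _ hb,
              List.getElem?_set, if_pos rfl, if_pos hrlen, Option.getD_some]
        · left
          rw [pvR, pvR, hrow, PySem.List.pySetD_of_nonneg _ _ hj, pvGetD_nn _ b _ hb,
              pvGetD_nn (PySem.List.pyGetD memo a []) b none hb,
              List.getElem?_set, if_pos rfl, if_neg hrlen,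
              List.getElem?_eq_none (by omega)]
      · left
        rw [pvR, pvR, hrow, PySem.List.pySetD_of_nonneg _ _ hj, pvGetD_nn _ b _ hb,
            pvGetD_nn (PySem.List.pyGetD memo a []) b none hb,
            List.getElem?_set, if_neg (by omega)]
    · left
      have h1 : PySem.List.pyGetD (pvWriteO memo a j v) a [] = PySem.List.pyGetD memo a [] := by
        rw [hrw, pvGetD_nn _ a _ ha, pvGetD_nn memo a [] ha, List.getElem?_set, if_pos rfl,
            if_neg hlen, List.getElem?_eq_none (by omega)]
      rw [pvR, pvR, h1]
  · left
    have h1 : PySem.List.pyGetD (pvWriteO memo i j v) a [] = PySem.List.pyGetD memo a [] := by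
      rw [pvWriteO, PySem.List.pySetD_of_nonneg memo _ hi, pvGetD_nn _ a _ ha,
          pvGetD_nn memo a [] ha, List.getElem?_set, if_neg (by omega)]
    rw [pvR, pvR, h1]

theorem pvGoodM_write (pts : List Int) (memo : List (List (Option Int))) (i j : Int)
    (hi : 0 ≤ i) (hj : 0 ≤ j) (hG : pvGoodM pts memo) :
    pvGoodM pts (pvWriteO memo i j (some (pvCost pts i j))) := by
  intro a b v ha hb h
  rcases pvR_writeO memo i j a b (some (pvCost pts i j)) hi hj ha hb with hc | ⟨hai, hbj, hc⟩
  · exact hG a b v ha hb (hc ▸ h)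
  · rw [hc] at h
    rw [Option.some_inj] at h
    rw [← h, hai, hbj]

-- the running 'if best is None or v < best' loop is the minimum of the list
theorem pvStep_min (t : List Int) : ∀ x : Int, t.foldl pvStep (some x) = some (t.foldl min x) := by
  induction t with
  | nil => intro x; rfl
  | cons v t ih =>
    intro x
    rw [List.foldl_cons, List.foldl_cons]
    have : pvStep (some x) v = some (min x v) := by
      rw [pvStep]
      split_ifs with h <;> simp [min_def] <;> omega
    rw [this, ih]

-- the k-loop: threading a good memo through correct recursive calls yields the running
-- minimum of the true interval costs
theorem pvFoldM (pts : List Int) (i j : Int)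
    (rec : Int → Int → List (List (Option Int)) → Int × List (List (Option Int)))
    (hi : 0 ≤ i)
    (H : ∀ a b m, 0 ≤ a → (b - a).toNat < (j - i).toNat → pvGoodM pts m →
      (rec a b m).1 = pvCost pts a b ∧ pvGoodM pts (rec a b m).2) :
    ∀ (L : List Int), (∀ k ∈ L, i < k ∧ k < j) →
    ∀ (best : Option Int) (memo : List (List (Option Int))), pvGoodM pts memo →
    (L.foldl (pvBody rec i j) (best, memo)).1
        = (L.map (fun k => pvCost pts i k + pvCost pts k j)).foldl pvStep best ∧
      pvGoodM pts (L.foldl (pvBody rec i j) (best, memo)).2 := by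
  intro L
  induction L with
  | nil => intro _ best memo hG; exact ⟨rfl, hG⟩
  | cons k t ih =>
    intro hmem best memo hG
    have hk := hmem k (List.mem_cons_self)
    rw [List.foldl_cons, List.map_cons, List.foldl_cons]
    have hstep : ∃ m2 : List (List (Option Int)), pvGoodM pts m2 ∧
        pvBody rec i j (best, memo) k = (pvStep best (pvCost pts i k + pvCost pts k j), m2) := by
      cases hik : pvR memo i k with
      | some v =>
        have hv := hG i k v hi (by omega) hik
        cases hkj : pvR memo k j with
        | some w =>
          have hw := hG k j w (by omega) (by omega) hkj
          exact ⟨memo, hG, by simp only [pvBody, hik, hkj]; rw [hv, hw]⟩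
        | none =>
          have h2 := H k j memo (by omega) (by omega) hG
          exact ⟨(rec k j memo).2, h2.2, by simp only [pvBody, hik, hkj]; rw [hv, h2.1]⟩
      | none =>
        have h1 := H i k memo hi (by omega) hG
        cases hkj : pvR (rec i k memo).2 k j with
        | some w =>
          have hw := h1.2 k j w (by omega) (by omega) hkj
          exact ⟨(rec i k memo).2, h1.2, by simp only [pvBody, hik, hkj]; rw [h1.1, hw]⟩
        | none =>
          have h2 := H k j (rec i k memo).2 (by omega) (by omega) h1.2
          exact ⟨(rec k j (rec i k memo).2).2, h2.2,
            by simp only [pvBody, hik, hkj]; rw [h1.1, h2.1]⟩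
    obtain ⟨m2, hm2, heq⟩ := hstep
    rw [heq]
    exact ih (fun x hx => hmem x (List.mem_cons_of_mem _ hx)) _ m2 hm2

-- main correctness of the memoized recursion, by induction on the fuel
theorem pvMemoM_main (pts : List Int) : ∀ (fuel : Nat) (i j : Int)
    (memo : List (List (Option Int))), 0 ≤ i → (j - i).toNat ≤ fuel → pvGoodM pts memo →
    (pvCostRec pts fuel i j memo).1 = pvCost pts i j ∧
      pvGoodM pts (pvCostRec pts fuel i j memo).2 := by
  intro fuel
  induction fuel with
  | zero =>
    intro i j memo hi hle hG
    rw [pvCostRec, pvCost_deg pts i j (by omega)]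
    exact ⟨rfl, hG⟩
  | succ fuel ih =>
    intro i j memo hi hle hG
    by_cases h1 : j - i ≤ 1
    · rw [pvCostRec, if_pos h1, pvCost_deg pts i j h1]
      exact ⟨rfl, hG⟩
    · rw [pvCostRec, if_neg h1]
      cases hm : pvR memo i j with
      | some r =>
        exact ⟨hG i j r hi (by omega) hm, hG⟩
      | none =>
        simp only
        have H : ∀ a b m, 0 ≤ a → (b - a).toNat < (j - i).toNat → pvGoodM pts m →
            (pvCostRec pts fuel a b m).1 = pvCost pts a b ∧
              pvGoodM pts (pvCostRec pts fuel a b m).2 :=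
          fun a b m ha hlt hGm => ih a b m ha (by omega) hGm
        have hmem : ∀ k ∈ PySem.List.pyRange (i+1) j 1, i < k ∧ k < j := by
          intro k hk; rw [PySem.List.mem_pyRange_one] at hk; omega
        have hfold := pvFoldM pts i j (pvCostRec pts fuel) hi H
          (PySem.List.pyRange (i+1) j 1) hmem none memo hG
        set res := (PySem.List.pyRange (i+1) j 1).foldl
          (pvBody (pvCostRec pts fuel) i j) (none, memo) with hres
        -- the loop is nonempty: its running minimum is min? of the mapped range
        have hcons : PySem.List.pyRange (i+1) j 1
            = (i+1) :: PySem.List.pyRange (i+1+1) j 1 :=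
          PySem.List.pyRange_one_cons (by omega)
        have hbest : res.1.getD 0 = (PySem.List.min? ((PySem.List.pyRange (i+1) j 1).map
            (fun k => pvCost pts i k + pvCost pts k j)) (fun x => x)).getD 0 := by
          rw [hfold.1, hcons, List.map_cons, PySem.List.min?_id_cons, List.foldl_cons]
          have hst : pvStep none (pvCost pts i (i+1) + pvCost pts (i+1) j) =
              some (pvCost pts i (i+1) + pvCost pts (i+1) j) := rfl
          rw [hst, pvStep_min]
        have hv : res.1.getD 0 + PySem.List.pyGetD pts j 0 - PySem.List.pyGetD pts i 0 - 2
            = pvCost pts i j := by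
          rw [hbest, pvCost_unfold pts i j (by omega)]
        refine ⟨hv, ?_⟩
        rw [hv]
        exact pvGoodM_write pts res.2 i j hi (by omega) hfold.2

-- the initial all-None table is trivially good
theorem pvGoodM_init (pts : List Int) (Q : Int) :
    pvGoodM pts ((PySem.List.pyRange 0 (Q+2) 1).map
      (fun _ => List.replicate (Q+2).toNat (none : Option Int))) := by
  intro a b v ha hb h
  exfalso
  rw [pvR, pvGetD_nn _ b _ hb, pvGetD_nn _ a _ ha] at h
  cases hrow : ((PySem.List.pyRange 0 (Q+2) 1).map
      (fun _ => List.replicate (Q+2).toNat (none : Option Int)))[a.toNat]? with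
  | none => rw [hrow] at h; simp at h
  | some r =>
    rw [hrow] at h
    obtain ⟨x, _, hx⟩ := List.mem_map.mp (List.mem_of_getElem? hrow)
    rw [Option.getD_some, ← hx, List.getElem?_replicate] at h
    split_ifs at h <;> simp_all

theorem pvSolveB_eq (P Q : Int) (A : List Int) :
    solve_alt P Q A = pvCost (0 :: (A ++ [P+1])) 0 (Q+1) := by
  unfold solve_alt
  simp only [List.cons_append, List.nil_append]
  exact (pvMemoM_main (0 :: (A ++ [P+1])) (Q+2).toNat 0 (Q+1) _ le_rfl (by omega)
    (pvGoodM_init (0 :: (A ++ [P+1])) Q)).1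

-- ===== VERDICT (by name: the statement is the Claim_ definition above) =====
theorem solve_spec : Claim_equal_solve := by
  intro P Q A _ hPre
  unfold Spec_solve
  rw [pvSolveA_eq P Q A hPre.1, pvSolveB_eq P Q A]
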